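-- pv_equiv track=rewrite | github.com/ErickDum/CDMA_encoder_decoder | app/calc/cdma.py | generate_codes
-- ===== SOURCE A (Python) =====
-- import math
--
-- def generate_codes(sf):
--     level = int(math.log2(sf))
--     dp = [[1]]
--     for _ in range(level):
--         codes = []
--         for code in dp:
--             c1 = code + code
--             c2 = code + [0 if x == 1 else 1 for x in code]
--             codes.append(c1)
--             codes.append(c2)
--         dp = codes
--     return dp
-- ===== SOURCE B (Python) =====
-- def generate_codes(sf):
--     # recursive divide-and-conquer on sf itself: halving sf performs exactly
--     # int(log2(sf)) doubling steps, so no logarithm is needed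
--     if sf < 2:
--         return [[1]]
--     half = generate_codes(sf // 2)
--     return [row for c in half for row in (c + c, c + [1 - x for x in c])]
-- ===== Notes on version B (the rewrite author's own statement) =====
-- stated objective: simpler
-- what changed: B drops A's logarithm computation and iterative doubling loop with explicit accumulator lists in favour of a direct recursion that halves the spreading factor (base case a single one-element code) and flattens each code into its two children.
-- outside the precondition, e.g. on generate_codes(0): A raises ValueError, B returns [[1]]
import Mathlib
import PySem

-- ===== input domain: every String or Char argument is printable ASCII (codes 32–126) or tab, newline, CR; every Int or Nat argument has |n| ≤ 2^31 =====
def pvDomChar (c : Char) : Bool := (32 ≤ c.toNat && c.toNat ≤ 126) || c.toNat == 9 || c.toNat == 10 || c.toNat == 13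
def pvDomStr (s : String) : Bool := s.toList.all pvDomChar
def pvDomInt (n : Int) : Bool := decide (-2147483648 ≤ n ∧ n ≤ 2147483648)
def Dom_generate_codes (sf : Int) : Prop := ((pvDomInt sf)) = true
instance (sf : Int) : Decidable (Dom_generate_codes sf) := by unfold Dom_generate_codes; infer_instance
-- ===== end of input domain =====

-- B replaces A's log2 + iterative doubling loop by a direct recursion on sf // 2; objective: simpler.

-- ===== PORT A =====
-- int(math.log2(sf)) equals floor(log2 sf) exactly for 1 ≤ sf ≤ 2^31 (double precision
-- suffices there), ported as Nat.log2 sf.toNat.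
def generate_codes (sf : Int) : List (List Int) :=
  let level := Nat.log2 sf.toNat
  (List.range level).foldl
    (fun dp _ =>
      dp.foldl (fun codes code =>
        codes ++ [code ++ code, code ++ code.map (fun x => if x == 1 then 0 else 1)]) [])
    [[1]]

-- ===== PORT B =====
def generate_codes_alt (sf : Int) : List (List Int) :=
  if sf < 2 then [[1]]
  else
    (generate_codes_alt (PySem.Int.floordiv sf 2)).flatMap
      (fun c => [c ++ c, c ++ c.map (fun x => 1 - x)])
termination_by sf.toNat
decreasing_by
  rw [PySem.Int.floordiv_eq_ediv_of_pos (by omega)]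
  omega

-- ===== PRECONDITION & SPEC =====
-- A raises ValueError (math.log2 of a non-positive number) for sf ≤ 0; those inputs are excluded.
def Pre_generate_codes (sf : Int) : Prop := 1 ≤ sf
instance (sf : Int) : Decidable (Pre_generate_codes sf) := by unfold Pre_generate_codes; infer_instance
def pvWitness_generate_codes : Int := (4)

def Spec_generate_codes (sf : Int) (out : List (List Int)) : Prop := out = generate_codes_alt sf
instance (sf : Int) (out : List (List Int)) : Decidable (Spec_generate_codes sf out) := by unfold Spec_generate_codes; infer_instance

-- ===== CLAIM (what is proved, stated in full; the proofs are below) =====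
def Claim_equal_generate_codes : Prop := ∀ (sf : Int), Dom_generate_codes sf → Pre_generate_codes sf → Spec_generate_codes sf (generate_codes sf)

-- ===== LEMMAS AND PROOFS =====

-- A's inner loop body and B's flatMap body, named for the proofs.
def pvStepA (dp : List (List Int)) : List (List Int) :=
  dp.foldl (fun codes code =>
    codes ++ [code ++ code, code ++ code.map (fun x => if x == 1 then 0 else 1)]) []

def pvStepB (dp : List (List Int)) : List (List Int) :=
  dp.flatMap (fun c => [c ++ c, c ++ c.map (fun x => 1 - x)])

-- invariant: all entries are 0 or 1
def pvBin (dp : List (List Int)) : Prop := ∀ c ∈ dp, ∀ x ∈ c, x = 0 ∨ x = 1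

theorem pvStepA_eq_pvStepB (dp : List (List Int)) (h : pvBin dp) : pvStepA dp = pvStepB dp := by
  unfold pvStepA pvStepB
  rw [PySem.List.foldl_append_eq_flatMap]
  simp only [List.nil_append]
  apply List.flatMap_congr
  intro c hc
  have hmap : c.map (fun x => if x == 1 then (0:Int) else 1) = c.map (fun x => 1 - x) := by
    apply List.map_congr_left
    intro x hx
    rcases h c hc x hx with h0 | h1 <;> subst_vars <;> simp
  rw [hmap]

theorem pvBin_stepB (dp : List (List Int)) (h : pvBin dp) : pvBin (pvStepB dp) := by
  intro c hc x hx
  simp only [pvStepB, List.mem_flatMap] at hc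
  obtain ⟨c0, hc0, hmem⟩ := hc
  simp only [List.mem_cons, List.not_mem_nil, or_false] at hmem
  rcases hmem with rfl | rfl <;> simp only [List.mem_append, List.mem_map] at hx
  · rcases hx with h' | h' <;> exact h c0 hc0 x h'
  · rcases hx with h' | ⟨y, hy, rfl⟩
    · exact h c0 hc0 x h'
    · rcases h c0 hc0 y hy with rfl | rfl <;> simp

theorem pvBin_iterate (n : ℕ) (dp : List (List Int)) (h : pvBin dp) :
    pvBin (pvStepB^[n] dp) := by
  induction n generalizing dp with
  | zero => exact h
  | succ n ih => rw [Function.iterate_succ_apply]; exact ih _ (pvBin_stepB dp h)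

theorem pvFoldl_eq_iterate (n : ℕ) (dp : List (List Int)) (h : pvBin dp) :
    (List.range n).foldl (fun d _ => pvStepA d) dp = pvStepB^[n] dp := by
  induction n with
  | zero => rfl
  | succ n ih =>
      rw [List.range_succ, List.foldl_append, ih, Function.iterate_succ_apply']
      simp only [List.foldl_cons, List.foldl_nil]
      exact pvStepA_eq_pvStepB _ (pvBin_iterate n dp h)

theorem pvAlt_eq_iterate_aux (n : ℕ) : ∀ (sf : Int), sf.toNat ≤ n → 1 ≤ sf →
    generate_codes_alt sf = pvStepB^[Nat.log2 sf.toNat] [[1]] := by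
  induction n with
  | zero => intro sf hle h; omega
  | succ n ih =>
    intro sf hle h
    rw [generate_codes_alt]
    by_cases h2 : sf < 2
    · have : sf = 1 := by omega
      subst this
      rw [Nat.log2_def]
      simp
    · rw [if_neg h2, PySem.Int.floordiv_eq_ediv_of_pos (by norm_num)]
      have hhalf : (1:Int) ≤ sf / 2 := by omega
      have hlt : sf / 2 < sf := by omega
      rw [ih (sf / 2) (by omega) hhalf]
      have hN : (sf / 2).toNat = sf.toNat / 2 := by omega
      have hlog : Nat.log2 sf.toNat = Nat.log2 (sf.toNat / 2) + 1 := by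
        rw [Nat.log2_def, if_pos (show sf.toNat ≥ 2 by omega)]
      rw [hN, hlog, Function.iterate_succ_apply']
      rfl

theorem pvAlt_eq_iterate (sf : Int) (h : 1 ≤ sf) :
    generate_codes_alt sf = pvStepB^[Nat.log2 sf.toNat] [[1]] :=
  pvAlt_eq_iterate_aux sf.toNat sf le_rfl h

-- ===== VERDICT (by name: the statement is the Claim_ definition above) =====
theorem generate_codes_spec : Claim_equal_generate_codes := by
  intro sf _ hpre
  unfold Spec_generate_codes generate_codes
  have hbin : pvBin [[1]] := by intro c hc x hx; simp at hc; subst hc; simp at hx; omega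
  rw [show (fun (dp : List (List Int)) (_ : ℕ) =>
        dp.foldl (fun codes code =>
          codes ++ [code ++ code, code ++ code.map (fun x => if x == 1 then (0:Int) else 1)]) [])
      = fun d _ => pvStepA d from rfl]
  rw [pvFoldl_eq_iterate _ _ hbin, pvAlt_eq_iterate sf hpre]
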